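-- pv_equiv track=rewrite | github.com/AliceBaker73/COG260_final_project | prototype.py | get_contour_z_data
-- ===== SOURCE A (Python) =====
-- def get_contour_z_data(pd):
--     """Given a list of plot data, split tuples into three lists"""
--     zProtoData = []
--     for data in pd:
--         if data[1] == "0" or data[0] == "J" or data[0] == "A":
--             continue
--         else:
--             zProtoData.append(data[2])
--
--     zProtoData2 = [zProtoData[i:i+40] for i in range(0, 320, 40)]
--     return zProtoData2
-- ===== SOURCE B (Python) =====
-- def get_contour_z_data(pd):
--     """Given a list of plot data, split tuples into three lists"""
--     result = [[] for _ in range(8)]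
--     c = 0
--     for data in pd:
--         if data[1] == "0" or data[0] == "J" or data[0] == "A":
--             continue
--         if c < 320:
--             result[c // 40].append(data[2])
--         c += 1
--     return result
-- ===== Notes on version B (the rewrite author's own statement) =====
-- stated objective: alternative
-- what changed: Fuses the filter and the chunking into one pass that places each accepted element directly into its bucket (c // 40) of a pre-built list of 8 buckets, instead of building a flat list and then slicing it into fixed 40-element windows.
import Mathlib
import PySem

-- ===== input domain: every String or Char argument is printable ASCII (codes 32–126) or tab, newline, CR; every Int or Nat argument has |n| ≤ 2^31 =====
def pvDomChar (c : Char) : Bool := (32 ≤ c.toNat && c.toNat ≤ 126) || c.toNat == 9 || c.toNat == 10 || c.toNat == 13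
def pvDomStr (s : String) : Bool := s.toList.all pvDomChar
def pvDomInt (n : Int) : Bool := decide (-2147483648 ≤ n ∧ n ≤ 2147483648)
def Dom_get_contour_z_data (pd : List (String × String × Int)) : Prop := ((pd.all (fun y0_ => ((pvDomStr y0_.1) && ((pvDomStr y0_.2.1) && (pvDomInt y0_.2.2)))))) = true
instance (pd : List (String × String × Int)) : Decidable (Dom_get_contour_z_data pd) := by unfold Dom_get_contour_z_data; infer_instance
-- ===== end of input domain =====

-- B fuses A's filter pass and the subsequent fixed-window slicing into one pass that drops each
-- accepted element directly into its bucket (objective: alternative decomposition, same cost).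


-- ===== PORT A =====
def get_contour_z_data (pd : List (String × String × Int)) : List (List Int) :=
  let zProtoData : List Int :=
    pd.foldl (fun acc data =>
      if data.2.1 == "0" || data.1 == "J" || data.1 == "A" then acc
      else acc ++ [data.2.2]) []
  (PySem.List.pyRange 0 320 40).map (fun i => PySem.List.slice zProtoData (some i) (some (i + 40)))

-- ===== PORT B =====
def get_contour_z_data_alt (pd : List (String × String × Int)) : List (List Int) :=
  (pd.foldl (fun (s : List (List Int) × Int) data =>
      if data.2.1 == "0" || data.1 == "J" || data.1 == "A" then s
      else
        (if s.2 < 320 then s.1.modify (PySem.Int.floordiv s.2 40).toNat (· ++ [data.2.2]) else s.1,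
         s.2 + 1))
    (List.replicate 8 [], 0)).1

-- ===== PRECONDITION & SPEC =====
def Spec_get_contour_z_data (pd : List (String × String × Int)) (out : List (List Int)) : Prop := out = get_contour_z_data_alt pd
instance (pd : List (String × String × Int)) (out : List (List Int)) : Decidable (Spec_get_contour_z_data pd out) := by unfold Spec_get_contour_z_data; infer_instance

-- ===== CLAIM (what is proved, stated in full; the proofs are below) =====
def Claim_equal_get_contour_z_data : Prop := ∀ (pd : List (String × String × Int)), Dom_get_contour_z_data pd → Spec_get_contour_z_data pd (get_contour_z_data pd)

-- ===== LEMMAS AND PROOFS =====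

-- the sequence of accepted z-values
def pvFlt (pd : List (String × String × Int)) : List Int :=
  (pd.filter (fun d => !(d.2.1 == "0" || d.1 == "J" || d.1 == "A"))).map (·.2.2)

-- the 8 fixed windows of 40 taken from a flat list
def pvChunks (g : List Int) : List (List Int) :=
  (List.range 8).map (fun k => (g.drop (40 * k)).take 40)

theorem pvFlt_cons (d : String × String × Int) (pd : List (String × String × Int)) :
    pvFlt (d :: pd) =
      (if d.2.1 == "0" || d.1 == "J" || d.1 == "A" then [] else [d.2.2]) ++ pvFlt pd := by
  simp only [pvFlt, List.filter_cons]
  split_ifs with h <;> simp_all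

theorem pvFoldA (pd : List (String × String × Int)) (g0 : List Int) :
    pd.foldl (fun acc data =>
      if data.2.1 == "0" || data.1 == "J" || data.1 == "A" then acc
      else acc ++ [data.2.2]) g0 = g0 ++ pvFlt pd := by
  induction pd generalizing g0 with
  | nil => simp [pvFlt]
  | cons d pd ih =>
    rw [List.foldl_cons, pvFlt_cons]
    by_cases h : (d.2.1 == "0" || d.1 == "J" || d.1 == "A") = true
    · rw [if_pos h, if_pos h, ih]
      simp
    · rw [if_neg h, if_neg h, ih]
      simp

theorem pvChunks_append_lt (g : List Int) (z : Int) (h : g.length < 320) :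
    (pvChunks g).modify (g.length / 40) (· ++ [z]) = pvChunks (g ++ [z]) := by
  apply List.ext_getElem
  · simp [pvChunks, List.length_modify]
  · intro k hk hk'
    have hk8 : k < 8 := by simpa [pvChunks] using hk'
    rw [List.getElem_modify]
    simp only [pvChunks, List.getElem_map, List.getElem_range]
    by_cases hm : g.length / 40 = k
    · rw [if_pos hm, List.drop_append, ← hm]
      have h1 : 40 * (g.length / 40) ≤ g.length := by omega
      rw [Nat.sub_eq_zero_of_le h1, List.drop_zero,
        List.take_of_length_le (by simp; omega),
        List.take_of_length_le (by simp; omega)]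
    · rw [if_neg hm]
      rcases Nat.lt_or_ge k (g.length / 40) with hlt | hge
      · -- bucket k is already full: 40*k + 40 <= g.length
        rw [List.drop_append, List.take_append_of_le_length (by simp; omega)]
      · -- bucket k is still untouched: g.length < 40*k
        have hgt : g.length / 40 < k := lt_of_le_of_ne hge hm
        rw [List.drop_eq_nil_of_le (as := g) (by omega),
          List.drop_eq_nil_of_le (as := g ++ [z]) (by simp; omega)]

theorem pvChunks_append_ge (g : List Int) (z : Int) (h : 320 ≤ g.length) :
    pvChunks (g ++ [z]) = pvChunks g := by
  apply List.ext_getElem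
  · simp [pvChunks]
  · intro k hk hk'
    have hk8 : k < 8 := by simpa [pvChunks] using hk
    simp only [pvChunks, List.getElem_map, List.getElem_range]
    rw [List.drop_append, List.take_append_of_le_length (by simp; omega)]

theorem pvFoldB (pd : List (String × String × Int)) (g : List Int) :
    pd.foldl (fun (s : List (List Int) × Int) data =>
      if data.2.1 == "0" || data.1 == "J" || data.1 == "A" then s
      else
        (if s.2 < 320 then s.1.modify (PySem.Int.floordiv s.2 40).toNat (· ++ [data.2.2]) else s.1,
         s.2 + 1)) (pvChunks g, (g.length : Int))
    = (pvChunks (g ++ pvFlt pd), (g.length : Int) + (pvFlt pd).length) := by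
  induction pd generalizing g with
  | nil => simp [pvFlt]
  | cons d pd ih =>
    rw [List.foldl_cons, pvFlt_cons]
    by_cases h : (d.2.1 == "0" || d.1 == "J" || d.1 == "A") = true
    · rw [if_pos h, ih]
      simp [h]
    · have hL : ((g ++ [d.2.2]).length : Int) = (g.length : Int) + 1 := by
        simp
      by_cases hc : ((g.length : Int) < 320)
      · have hlen : g.length < 320 := by exact_mod_cast hc
        have hfd : (PySem.Int.floordiv (g.length : Int) 40).toNat = g.length / 40 := by
          rw [PySem.Int.floordiv_eq_ediv_of_pos (by omega)]; omega
        simp only [if_neg h, if_pos hc, hfd, pvChunks_append_lt g d.2.2 hlen]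
        rw [show (g.length : Int) + 1 = ((g ++ [d.2.2]).length : Int) by simp,
          ih (g ++ [d.2.2])]
        refine Prod.ext ?_ ?_
        · simp [List.append_assoc]
        · simp; omega
      · have hlen : 320 ≤ g.length := by omega
        simp only [if_neg h, if_neg hc]
        rw [← pvChunks_append_ge g d.2.2 hlen,
          show (g.length : Int) + 1 = ((g ++ [d.2.2]).length : Int) by simp,
          ih (g ++ [d.2.2])]
        refine Prod.ext ?_ ?_
        · simp [List.append_assoc]
        · simp; omega

theorem pvA_eq_chunks (pd : List (String × String × Int)) :
    get_contour_z_data pd = pvChunks (pvFlt pd) := by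
  unfold get_contour_z_data
  rw [pvFoldA pd []]
  have hr : PySem.List.pyRange 0 320 40 = [0, 40, 80, 120, 160, 200, 240, 280] := by decide
  rw [hr]
  simp only [List.nil_append, List.map_cons, List.map_nil]
  have hs : ∀ (a : Int) (g : List Int), 0 ≤ a →
      PySem.List.slice g (some a) (some (a + 40)) = (g.drop a.toNat).take 40 := by
    intro a g ha
    rw [PySem.List.slice_toNat g ha (by omega)]
    congr 1
    omega
  rw [hs 0 _ (by norm_num), hs 40 _ (by norm_num), hs 80 _ (by norm_num),
    hs 120 _ (by norm_num), hs 160 _ (by norm_num), hs 200 _ (by norm_num),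
    hs 240 _ (by norm_num), hs 280 _ (by norm_num)]
  have h8 : List.range 8 = [0, 1, 2, 3, 4, 5, 6, 7] := by decide
  simp [pvChunks, h8]

-- ===== VERDICT (by name: the statement is the Claim_ definition above) =====
theorem get_contour_z_data_spec : Claim_equal_get_contour_z_data := by
  intro pd _
  unfold Spec_get_contour_z_data get_contour_z_data_alt
  rw [pvA_eq_chunks]
  have h0 : (List.replicate 8 ([] : List Int), (0 : Int)) = (pvChunks [], (([] : List Int).length : Int)) := by
    decide
  rw [h0, pvFoldB pd []]
  simp
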